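-- pv_equiv track=rewrite | github.com/tringuyen180303/TIP102-CodePath | unit10/session2/version1/problem1.py | calculate_cost
-- ===== SOURCE A (Python) =====
-- def calculate_cost(flights, start, dest):
--     visited = set()
--     def dfs(current, total):
--         if current == dest:
--             return total
--         for neighbor, cost in flights.get(current, []):
--             if neighbor not in visited:
--                 visited.add(neighbor)
--                 result = dfs(neighbor, total + cost)
--                 if result != -1:
--                     return result
--         return -1
--
--     return dfs(start, 0)
-- ===== SOURCE B (Python) =====
-- def calculate_cost(flights, start, dest):
--     if start == dest:
--         return 0
--     visited = set()
--     stack = [(0, iter(flights.get(start, [])))]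
--     while stack:
--         total, it = stack[-1]
--         for neighbor, cost in it:
--             if neighbor not in visited:
--                 if neighbor == dest:
--                     return total + cost
--                 visited.add(neighbor)
--                 stack.append((total + cost, iter(flights.get(neighbor, []))))
--                 break
--         else:
--             stack.pop()
--     return -1
-- ===== Notes on version B (the rewrite author's own statement) =====
-- stated objective: alternative
-- what changed: The recursive DFS with an implicit call stack is replaced by an iterative DFS driven by an explicit stack of (accumulated total, neighbor iterator) frames, with the dest test moved to neighbor-selection time.
import Mathlib
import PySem

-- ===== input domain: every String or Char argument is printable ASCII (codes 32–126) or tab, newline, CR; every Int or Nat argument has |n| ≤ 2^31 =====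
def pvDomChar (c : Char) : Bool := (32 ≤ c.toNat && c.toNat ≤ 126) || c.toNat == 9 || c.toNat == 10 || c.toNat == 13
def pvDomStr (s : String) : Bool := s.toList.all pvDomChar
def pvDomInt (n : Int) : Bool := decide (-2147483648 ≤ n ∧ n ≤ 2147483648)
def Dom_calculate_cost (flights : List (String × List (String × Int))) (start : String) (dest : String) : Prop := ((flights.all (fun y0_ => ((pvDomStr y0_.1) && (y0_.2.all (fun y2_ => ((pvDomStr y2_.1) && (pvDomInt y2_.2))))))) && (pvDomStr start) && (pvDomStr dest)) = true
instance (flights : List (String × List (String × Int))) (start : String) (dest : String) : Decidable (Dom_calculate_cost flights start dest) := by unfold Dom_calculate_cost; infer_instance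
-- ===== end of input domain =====

-- B replaces A's recursive DFS by an iterative DFS over an explicit stack of
-- (accumulated total, remaining-neighbors) frames; same return value, proved below.

-- Shared plumbing (used by both ports): the list of all neighbor names, and the
-- adjacency lookup decorated with membership proofs (needed only for termination;
-- the computed values are exactly Python's flights.get(node, [])).
def pvNodes (flights : List (String × List (String × Int))) : List String :=
  flights.flatMap (fun p => p.2.map Prod.fst)

theorem pvAdj_mem {flights : List (String × List (String × Int))} {cur : String}
    {p : String × Int} (hp : p ∈ PySem.Dict.getD (PySem.Dict.mk flights) cur []) :
    p.1 ∈ pvNodes flights := by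
  unfold PySem.Dict.getD PySem.Dict.get? at hp
  cases hfind : List.find? (fun q => q.1 == cur) (PySem.Dict.mk flights).items with
  | none => simp [hfind] at hp
  | some q =>
    have hq : q ∈ flights := List.mem_of_find?_eq_some hfind
    simp only [hfind, Option.map_some, Option.getD_some] at hp
    exact List.mem_flatMap.mpr ⟨q, hq, List.mem_map.mpr ⟨p, hp, rfl⟩⟩

def pvAdj (flights : List (String × List (String × Int))) (cur : String) :
    List {p : String × Int // p.1 ∈ pvNodes flights} :=
  (PySem.Dict.getD (PySem.Dict.mk flights) cur []).attach.map
    (fun q => ⟨q.1, pvAdj_mem q.2⟩)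

-- termination measure: number of node names not yet visited
def pvUnvis (flights : List (String × List (String × Int))) (v : PySem.Set String) : Nat :=
  ((pvNodes flights).toFinset \ v.toFinset).card

theorem pvMem_add_self {v : PySem.Set String} {n : String} : n ∈ PySem.Set.add v n := by
  unfold PySem.Set.add
  split
  · rename_i hc
    exact List.contains_iff_mem.mp hc
  · exact List.mem_append_right _ (List.mem_singleton.mpr rfl)

theorem pvSubset_add {v : PySem.Set String} {n : String} : v ⊆ PySem.Set.add v n := by
  unfold PySem.Set.add
  split
  · exact fun _ h => h
  · exact List.subset_append_left _ _

theorem pvUnvis_mono {flights : List (String × List (String × Int))}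
    {v w : PySem.Set String} (h : v ⊆ w) : pvUnvis flights w ≤ pvUnvis flights v := by
  apply Finset.card_le_card
  apply Finset.sdiff_subset_sdiff subset_rfl
  intro x hx
  exact List.mem_toFinset.mpr (h (List.mem_toFinset.mp hx))

theorem pvUnvis_add_lt {flights : List (String × List (String × Int))}
    {v : PySem.Set String} {n : String} (hn : n ∈ pvNodes flights) (hv : n ∉ v) :
    pvUnvis flights (PySem.Set.add v n) < pvUnvis flights v := by
  apply Finset.card_lt_card
  constructor
  · apply Finset.sdiff_subset_sdiff subset_rfl
    intro x hx
    exact List.mem_toFinset.mpr (pvSubset_add (List.mem_toFinset.mp hx))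
  · intro hsub
    have h1 : n ∈ (pvNodes flights).toFinset \ v.toFinset := by
      simp [List.mem_toFinset, hn, hv]
    have h2 := hsub h1
    have h3 : n ∈ PySem.Set.add v n := pvMem_add_self
    simp [List.mem_toFinset, h3] at h2

theorem pvAdj_length_le (flights : List (String × List (String × Int))) (cur : String) :
    (pvAdj flights cur).length ≤ (pvNodes flights).length := by
  unfold pvAdj
  rw [List.length_map, List.length_attach]
  unfold PySem.Dict.getD PySem.Dict.get?
  cases hfind : List.find? (fun q => q.1 == cur) (PySem.Dict.mk flights).items with
  | none => simp
  | some q =>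
    have hq : q ∈ flights := List.mem_of_find?_eq_some hfind
    simp only [hfind, Option.map_some, Option.getD_some]
    obtain ⟨l1, l2, rfl⟩ := List.append_of_mem hq
    unfold pvNodes
    simp [List.flatMap_append]
    omega

-- ===== PORT A =====
-- A's recursive dfs: dfsA is the function body (the current == dest test, then the
-- neighbor loop goA over flights.get(current, [])).  The outer `visited` set that
-- Python mutates is threaded through as state; the subtype on the returned set only
-- records that visited grows (needed for termination) and adds no computation.
mutual
def dfsA (flights : List (String × List (String × Int))) (dest : String)
    (v : PySem.Set String) (current : String) (total : Int) :
    Int × {v' : PySem.Set String // v ⊆ v'} :=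
  if current = dest then (total, ⟨v, fun _ h => h⟩)
  else
    let out := goA flights dest v (pvAdj flights current) total
    (out.1, out.2)
termination_by (pvUnvis flights v, (pvNodes flights).length + 1)
decreasing_by
  exact Prod.Lex.right _ (Nat.lt_succ_of_le (pvAdj_length_le flights current))

def goA (flights : List (String × List (String × Int))) (dest : String)
    (v : PySem.Set String) (rest : List {p : String × Int // p.1 ∈ pvNodes flights})
    (total : Int) : Int × {v' : PySem.Set String // v ⊆ v'} :=
  match rest with
  | [] => (-1, ⟨v, fun _ h => h⟩)
  | q :: rest' =>
    if hv : q.1.1 ∈ v then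
      goA flights dest v rest' total
    else
      let out := dfsA flights dest (PySem.Set.add v q.1.1) q.1.1 (total + q.1.2)
      if out.1 ≠ -1 then
        (out.1, ⟨out.2.1, fun _ h => out.2.2 (pvSubset_add h)⟩)
      else
        let out2 := goA flights dest out.2.1 rest' total
        (out2.1, ⟨out2.2.1, fun _ h => out2.2.2 (out.2.2 (pvSubset_add h))⟩)
termination_by (pvUnvis flights v, rest.length)
decreasing_by
  · exact Prod.Lex.right _ (by simp)
  · exact Prod.Lex.left _ _ (pvUnvis_add_lt q.2 hv)
  · exact Prod.Lex.left _ _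
      (Nat.lt_of_le_of_lt (pvUnvis_mono (Subtype.prop _)) (pvUnvis_add_lt q.2 hv))
end

def calculate_cost (flights : List (String × List (String × Int))) (start : String)
    (dest : String) : Int :=
  (dfsA flights dest PySem.Set.empty start 0).1

-- ===== PORT B =====
-- B's iterative DFS: an explicit stack of (accumulated total, remaining neighbors)
-- frames; dest is recognised when a neighbor is selected; visited marks on-push.
def runB (flights : List (String × List (String × Int))) (dest : String)
    (v : PySem.Set String)
    (stack : List (Int × List {p : String × Int // p.1 ∈ pvNodes flights})) : Int :=
  match stack with
  | [] => -1
  | (_, []) :: frames => runB flights dest v frames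
  | (total, q :: rest') :: frames =>
    if hv : q.1.1 ∈ v then
      runB flights dest v ((total, rest') :: frames)
    else if q.1.1 = dest then
      total + q.1.2
    else
      runB flights dest (PySem.Set.add v q.1.1)
        ((total + q.1.2, pvAdj flights q.1.1) :: (total, rest') :: frames)
termination_by (pvUnvis flights v, (stack.map (fun f => f.2.length)).sum, stack.length)
decreasing_by
  · simp only [List.map_cons, List.sum_cons, List.length_cons, List.length_nil,
      Nat.zero_add]
    exact Prod.Lex.right _ (Prod.Lex.right _ (Nat.lt_succ_self _))
  · simp only [List.map_cons, List.sum_cons, List.length_cons]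
    exact Prod.Lex.right _ (Prod.Lex.left _ _ (by omega))
  · exact Prod.Lex.left _ _ (pvUnvis_add_lt q.2 hv)

def calculate_cost_alt (flights : List (String × List (String × Int))) (start : String)
    (dest : String) : Int :=
  if start = dest then 0
  else runB flights dest PySem.Set.empty [(0, pvAdj flights start)]

-- ===== PRECONDITION & SPEC =====
def Spec_calculate_cost (flights : List (String × List (String × Int))) (start : String) (dest : String) (out : Int) : Prop := out = calculate_cost_alt flights start dest
instance (flights : List (String × List (String × Int))) (start : String) (dest : String) (out : Int) : Decidable (Spec_calculate_cost flights start dest out) := by unfold Spec_calculate_cost; infer_instance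

-- ===== CLAIM (what is proved, stated in full; the proofs are below) =====
def Claim_equal_calculate_cost : Prop := ∀ (flights : List (String × List (String × Int))) (start : String) (dest : String), Dom_calculate_cost flights start dest → Spec_calculate_cost flights start dest (calculate_cost flights start dest)

-- ===== LEMMAS AND PROOFS =====

-- Once dest has been marked visited, A's neighbor loop can never succeed.
theorem goA_stuck (flights : List (String × List (String × Int))) (dest : String)
    (v : PySem.Set String) (rest : List {p : String × Int // p.1 ∈ pvNodes flights})
    (total : Int) (hd : dest ∈ v) : (goA flights dest v rest total).1 = -1 := by
  match rest with
  | [] =>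
    rw [goA.eq_def]
  | q :: rest' =>
    rw [goA.eq_def]
    dsimp only
    by_cases hv : q.1.1 ∈ v
    · rw [dif_pos hv]
      exact goA_stuck flights dest v rest' total hd
    · rw [dif_neg hv]
      have hne : q.1.1 ≠ dest := fun h => hv (h ▸ hd)
      have hin : (dfsA flights dest (PySem.Set.add v q.1.1) q.1.1 (total + q.1.2)).1
          = -1 := by
        rw [dfsA.eq_def, if_neg hne]
        exact goA_stuck flights dest (PySem.Set.add v q.1.1) (pvAdj flights q.1.1)
          (total + q.1.2) (pvSubset_add hd)
      rw [if_neg (fun h => h hin)]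
      exact goA_stuck flights dest
        (dfsA flights dest (PySem.Set.add v q.1.1) q.1.1 (total + q.1.2)).2.1 rest' total
        ((dfsA flights dest (PySem.Set.add v q.1.1) q.1.1 (total + q.1.2)).2.2
          (pvSubset_add hd))
termination_by (pvUnvis flights v, rest.length)
decreasing_by
  · exact Prod.Lex.right _ (by simp)
  · exact Prod.Lex.left _ _ (pvUnvis_add_lt q.2 hv)
  · exact Prod.Lex.left _ _
      (Nat.lt_of_le_of_lt (pvUnvis_mono (Subtype.prop _)) (pvUnvis_add_lt q.2 hv))

-- Once dest has been marked visited, B's machine can never succeed either.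
theorem runB_stuck (flights : List (String × List (String × Int))) (dest : String)
    (v : PySem.Set String)
    (stack : List (Int × List {p : String × Int // p.1 ∈ pvNodes flights}))
    (hd : dest ∈ v) : runB flights dest v stack = -1 := by
  match stack with
  | [] => rw [runB.eq_def]
  | (total, []) :: frames =>
    rw [runB.eq_def]
    exact runB_stuck flights dest v frames hd
  | (total, q :: rest') :: frames =>
    rw [runB.eq_def]
    dsimp only
    by_cases hv : q.1.1 ∈ v
    · rw [dif_pos hv]
      exact runB_stuck flights dest v ((total, rest') :: frames) hd
    · have hne : q.1.1 ≠ dest := fun h => hv (h ▸ hd)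
      rw [dif_neg hv, if_neg hne]
      exact runB_stuck flights dest (PySem.Set.add v q.1.1) _ (pvSubset_add hd)
termination_by (pvUnvis flights v, (stack.map (fun f => f.2.length)).sum, stack.length)
decreasing_by
  · simp only [List.map_cons, List.sum_cons, List.length_cons, List.length_nil,
      Nat.zero_add]
    exact Prod.Lex.right _ (Prod.Lex.right _ (Nat.lt_succ_self _))
  · simp only [List.map_cons, List.sum_cons, List.length_cons]
    exact Prod.Lex.right _ (Prod.Lex.left _ _ (by omega))
  · exact Prod.Lex.left _ _ (pvUnvis_add_lt q.2 hv)

-- Simulation: the machine with top frame (total, rest) computes exactly A's neighbor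
-- loop goA, then continues with the remaining frames on failure.
theorem runB_sim (flights : List (String × List (String × Int))) (dest : String)
    (v : PySem.Set String) (rest : List {p : String × Int // p.1 ∈ pvNodes flights})
    (total : Int)
    (frames : List (Int × List {p : String × Int // p.1 ∈ pvNodes flights})) :
    runB flights dest v ((total, rest) :: frames) =
      (if (goA flights dest v rest total).1 = -1
       then runB flights dest (goA flights dest v rest total).2.1 frames
       else (goA flights dest v rest total).1) := by
  match rest with
  | [] =>
    rw [runB.eq_def, goA.eq_def]
    simp
  | q :: rest' =>
    rw [runB.eq_def]
    dsimp only
    by_cases hv : q.1.1 ∈ v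
    · rw [dif_pos hv]
      have e1 : goA flights dest v (q :: rest') total = goA flights dest v rest' total := by
        rw [goA.eq_def]
        exact dif_pos hv
      rw [e1]
      exact runB_sim flights dest v rest' total frames
    · rw [dif_neg hv]
      have e1 : (goA flights dest v (q :: rest') total).1 =
          (if (dfsA flights dest (PySem.Set.add v q.1.1) q.1.1 (total + q.1.2)).1 ≠ -1
           then (dfsA flights dest (PySem.Set.add v q.1.1) q.1.1 (total + q.1.2)).1
           else (goA flights dest
             (dfsA flights dest (PySem.Set.add v q.1.1) q.1.1 (total + q.1.2)).2.1
             rest' total).1) := by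
        rw [goA.eq_def]
        dsimp only
        rw [dif_neg hv]
        by_cases h : (dfsA flights dest (PySem.Set.add v q.1.1) q.1.1 (total + q.1.2)).1 ≠ -1
        · rw [if_pos h, if_pos h]
        · rw [if_neg h, if_neg h]
      have e2 : (goA flights dest v (q :: rest') total).2.1 =
          (if (dfsA flights dest (PySem.Set.add v q.1.1) q.1.1 (total + q.1.2)).1 ≠ -1
           then (dfsA flights dest (PySem.Set.add v q.1.1) q.1.1 (total + q.1.2)).2.1
           else (goA flights dest
             (dfsA flights dest (PySem.Set.add v q.1.1) q.1.1 (total + q.1.2)).2.1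
             rest' total).2.1) := by
        rw [goA.eq_def]
        dsimp only
        rw [dif_neg hv]
        by_cases h : (dfsA flights dest (PySem.Set.add v q.1.1) q.1.1 (total + q.1.2)).1 ≠ -1
        · rw [if_pos h, if_pos h]
        · rw [if_neg h, if_neg h]
      rw [e1, e2]
      by_cases hq : q.1.1 = dest
      · -- selected neighbor is dest: A's recursive call returns total+cost at once
        have hdA1 : (dfsA flights dest (PySem.Set.add v q.1.1) q.1.1 (total + q.1.2)).1
            = total + q.1.2 := by
          rw [dfsA.eq_def, if_pos hq]
        have hdA2 : (dfsA flights dest (PySem.Set.add v q.1.1) q.1.1 (total + q.1.2)).2.1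
            = PySem.Set.add v q.1.1 := by
          rw [dfsA.eq_def, if_pos hq]
        rw [if_pos hq, hdA1, hdA2]
        by_cases hz : total + q.1.2 = -1
        · -- total+cost = -1 reads as failure in A; both sides end up returning -1
          have hmem : dest ∈ PySem.Set.add v q.1.1 := hq ▸ pvMem_add_self
          have h1 : (goA flights dest (PySem.Set.add v q.1.1) rest' total).1 = -1 :=
            goA_stuck flights dest _ rest' total hmem
          have h2 : runB flights dest
              (goA flights dest (PySem.Set.add v q.1.1) rest' total).2.1 frames = -1 :=
            runB_stuck flights dest _ frames
              ((goA flights dest (PySem.Set.add v q.1.1) rest' total).2.2 hmem)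
          simp [hz, h1, h2]
        · simp [hz]
      · -- selected neighbor is not dest: A recurses; B pushes a frame
        have hdA1 : (dfsA flights dest (PySem.Set.add v q.1.1) q.1.1 (total + q.1.2)).1
            = (goA flights dest (PySem.Set.add v q.1.1) (pvAdj flights q.1.1)
                (total + q.1.2)).1 := by
          rw [dfsA.eq_def, if_neg hq]
        have hdA2 : (dfsA flights dest (PySem.Set.add v q.1.1) q.1.1 (total + q.1.2)).2.1
            = (goA flights dest (PySem.Set.add v q.1.1) (pvAdj flights q.1.1)
                (total + q.1.2)).2.1 := by
          rw [dfsA.eq_def, if_neg hq]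
        rw [if_neg hq, hdA1, hdA2]
        rw [runB_sim flights dest (PySem.Set.add v q.1.1) (pvAdj flights q.1.1)
          (total + q.1.2) ((total, rest') :: frames),
          runB_sim flights dest
            (goA flights dest (PySem.Set.add v q.1.1) (pvAdj flights q.1.1)
              (total + q.1.2)).2.1 rest' total frames]
        by_cases hr : (goA flights dest (PySem.Set.add v q.1.1) (pvAdj flights q.1.1)
            (total + q.1.2)).1 = -1 <;> simp [hr]
termination_by (pvUnvis flights v, rest.length)
decreasing_by
  all_goals first
    | exact Prod.Lex.right _ (by simp)
    | exact Prod.Lex.left _ _ (pvUnvis_add_lt q.2 hv)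
    | exact Prod.Lex.left _ _
        (Nat.lt_of_le_of_lt (pvUnvis_mono (Subtype.prop _)) (pvUnvis_add_lt q.2 hv))

-- ===== VERDICT (by name: the statement is the Claim_ definition above) =====
theorem calculate_cost_spec : Claim_equal_calculate_cost := by
  intro flights start dest _
  unfold Spec_calculate_cost calculate_cost calculate_cost_alt
  rw [dfsA.eq_def]
  by_cases hs : start = dest
  · rw [if_pos hs, if_pos hs]
  · rw [if_neg hs, if_neg hs]
    dsimp only
    rw [runB_sim]
    by_cases hr : (goA flights dest PySem.Set.empty (pvAdj flights start) 0).1 = -1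
    · rw [if_pos hr, runB.eq_def, hr]
    · rw [if_neg hr]
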